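-- pv_equiv track=rewrite | github.com/Aryan-498/smart-vendor-proposal-comparison-from-emails | main.py | is_automated_email
-- ===== SOURCE A (Python) =====
-- AUTOMATED_KEYWORDS = [
--     "no-reply",
--     "noreply",
--     "notification",
--     "newsletter",
--     "updates"
-- ]
--
-- SOCIAL_DOMAINS = [
--     "instagram",
--     "facebook",
--     "linkedin",
--     "twitter",
--     "x.com",
--     "reddit",
--     "discord",
--     "youtube",
--     "tiktok",
--     "chess.com",
--     "github.com"
-- ]
--
-- def is_automated_email(sender):
--
--     sender_lower = sender.lower()
--
--     for keyword in AUTOMATED_KEYWORDS: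
--         if keyword in sender_lower:
--             return True
--
--     for domain in SOCIAL_DOMAINS:
--         if domain in sender_lower:
--             return True
--
--     return False
-- ===== SOURCE B (Python) =====
-- # B: first-character dispatch — a dict built once maps a character to the (few)
-- # patterns starting with it; a single left-to-right scan consults at each
-- # position only the bucket for the current character, so the per-position work
-- # drops from 16 startswith tests to at most 4 (usually 0).
-- _PATTERNS = [
--     "no-reply", "noreply", "notification", "newsletter", "updates",
--     "instagram", "facebook", "linkedin", "twitter", "x.com", "reddit",
--     "discord", "youtube", "tiktok", "chess.com", "github.com",
-- ]
--
-- _BUCKETS = {}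
-- for _p in _PATTERNS:
--     _BUCKETS.setdefault(_p[0], []).append(_p)
--
-- def is_automated_email(sender):
--     s = sender.lower()
--     for i, c in enumerate(s):
--         for p in _BUCKETS.get(c, ()):
--             if s.startswith(p, i):
--                 return True
--     return False
-- ===== Notes on version B (the rewrite author's own statement) =====
-- stated objective: alternative
-- what changed: B replaces A's per-pattern full substring searches with a single scan over string positions driven by a first-character dispatch table (dict from char to the patterns starting with it), so at each position only the matching bucket's few patterns are tested.
import Mathlib
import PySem

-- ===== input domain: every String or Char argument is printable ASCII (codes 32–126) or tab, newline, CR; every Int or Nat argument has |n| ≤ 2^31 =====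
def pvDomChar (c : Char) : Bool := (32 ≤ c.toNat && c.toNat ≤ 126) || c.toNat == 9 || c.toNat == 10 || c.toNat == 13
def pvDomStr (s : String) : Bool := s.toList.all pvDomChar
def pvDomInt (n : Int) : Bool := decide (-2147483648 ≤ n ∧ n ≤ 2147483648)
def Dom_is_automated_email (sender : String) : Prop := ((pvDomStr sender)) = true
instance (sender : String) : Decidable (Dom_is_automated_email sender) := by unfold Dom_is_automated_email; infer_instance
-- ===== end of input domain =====

-- B replaces the per-pattern substring searches with a single scan dispatching
-- through a first-character bucket table; objective: alternative.

-- ===== PORT A =====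
def automatedKeywords : List String :=
  ["no-reply", "noreply", "notification", "newsletter", "updates"]

def socialDomains : List String :=
  ["instagram", "facebook", "linkedin", "twitter", "x.com", "reddit",
   "discord", "youtube", "tiktok", "chess.com", "github.com"]

def is_automated_email (sender : String) : Bool :=
  let sender_lower := PySem.Str.lower sender
  if automatedKeywords.any (fun keyword => PySem.Str.isIn keyword sender_lower) then
    true
  else if socialDomains.any (fun domain => PySem.Str.isIn domain sender_lower) then
    true
  else
    false

-- ===== PORT B =====
-- _BUCKETS.get(c, ()): the dict from first character to the patterns starting
-- with it, written out (the dict is a compile-time constant in Source B).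
def pvBuckets (c : Char) : List (List Char) :=
  if c = 'n' then ["no-reply".toList, "noreply".toList, "notification".toList, "newsletter".toList]
  else if c = 'u' then ["updates".toList]
  else if c = 'i' then ["instagram".toList]
  else if c = 'f' then ["facebook".toList]
  else if c = 'l' then ["linkedin".toList]
  else if c = 't' then ["twitter".toList, "tiktok".toList]
  else if c = 'x' then ["x.com".toList]
  else if c = 'r' then ["reddit".toList]
  else if c = 'd' then ["discord".toList]
  else if c = 'y' then ["youtube".toList]
  else if c = 'c' then ["chess.com".toList]
  else if c = 'g' then ["github.com".toList]
  else []

-- the 'for i, c in enumerate(s)' scan, one suffix per position;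
-- s.startswith(p, i) is startswith on the i-th suffix (exact for 0 ≤ i ≤ len s)
def pvScan : List Char → Bool
  | [] => false
  | c :: rest =>
      if (pvBuckets c).any (fun p => PySem.Chars.startswith (c :: rest) p) then true
      else pvScan rest

def is_automated_email_alt (sender : String) : Bool :=
  pvScan (PySem.Str.lower sender).toList

-- ===== PRECONDITION & SPEC =====
def Spec_is_automated_email (sender : String) (out : Bool) : Prop := out = is_automated_email_alt sender
instance (sender : String) (out : Bool) : Decidable (Spec_is_automated_email sender out) := by unfold Spec_is_automated_email; infer_instance

-- ===== CLAIM (what is proved, stated in full; the proofs are below) =====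
def Claim_equal_is_automated_email : Prop := ∀ (sender : String), Dom_is_automated_email sender → Spec_is_automated_email sender (is_automated_email sender)

-- ===== LEMMAS AND PROOFS =====
def pvAllPatterns : List (List Char) :=
  (automatedKeywords ++ socialDomains).map String.toList

set_option maxHeartbeats 1600000 in
theorem pvBuckets_subset (c : Char) (p : List Char) (hp : p ∈ pvBuckets c) :
    p ∈ pvAllPatterns := by
  unfold pvBuckets at hp
  split_ifs at hp <;>
    simp only [List.mem_cons, List.not_mem_nil, or_false] at hp <;>
      first
        | exact hp.elim
        | (rcases hp with h | h | h | h <;> subst h <;>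
            simp [pvAllPatterns, automatedKeywords, socialDomains])
        | (rcases hp with h | h <;> subst h <;>
            simp [pvAllPatterns, automatedKeywords, socialDomains])
        | (subst hp; simp [pvAllPatterns, automatedKeywords, socialDomains])

-- at a position, testing the current character's bucket equals testing all patterns
theorem pvBucket_any_eq (c : Char) (rest : List Char) :
    (pvBuckets c).any (fun p => PySem.Chars.startswith (c :: rest) p)
      = pvAllPatterns.any (fun p => PySem.Chars.startswith (c :: rest) p) := by
  rw [Bool.eq_iff_iff]
  simp only [List.any_eq_true, PySem.Chars.startswith_iff]
  constructor
  · rintro ⟨p, hp, h⟩; exact ⟨p, pvBuckets_subset c p hp, h⟩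
  · rintro ⟨p, hp, h⟩
    refine ⟨p, ?_, h⟩
    simp only [pvAllPatterns, automatedKeywords, socialDomains, List.map_cons, List.map_nil,
      List.cons_append, List.nil_append, List.mem_cons, List.not_mem_nil, or_false] at hp
    rcases hp with hp|hp|hp|hp|hp|hp|hp|hp|hp|hp|hp|hp|hp|hp|hp|hp <;> subst hp <;>
      (simp [List.cons_prefix_cons] at h; rw [← h.1]; simp [pvBuckets])

theorem pvScan_eq_any (s : List Char) :
    pvScan s = pvAllPatterns.any (fun p => PySem.Chars.isIn p s) := by
  induction s with
  | nil => decide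
  | cons c rest ih =>
    rw [pvScan, pvBucket_any_eq]
    split_ifs with h
    · simp only [List.any_eq_true, PySem.Chars.startswith_iff] at h
      obtain ⟨p, hp, hpre⟩ := h
      symm
      rw [List.any_eq_true]
      exact ⟨p, hp, by rw [PySem.Chars.isIn_iff_infix]; exact hpre.isInfix⟩
    · rw [ih, Bool.eq_iff_iff]
      simp only [List.any_eq_true, PySem.Chars.isIn_iff_infix, PySem.Chars.startswith_iff,
        List.infix_cons_iff] at h ⊢
      push Not at h
      constructor
      · rintro ⟨p, hp, hin⟩; exact ⟨p, hp, Or.inr hin⟩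
      · rintro ⟨p, hp, hpre | hin⟩
        · exact absurd hpre (h p hp)
        · exact ⟨p, hp, hin⟩

theorem pvA_eq (sender : String) :
    is_automated_email sender
      = (automatedKeywords ++ socialDomains).any
          (fun k => PySem.Str.isIn k (PySem.Str.lower sender)) := by
  unfold is_automated_email
  rw [List.any_append]
  show (if _ = true then true else if _ = true then true else false) = _
  split_ifs with h1 h2 <;> simp_all

theorem pvMain_eq (sender : String) :
    is_automated_email sender = is_automated_email_alt sender := by
  rw [pvA_eq]
  unfold is_automated_email_alt
  rw [pvScan_eq_any]
  simp [pvAllPatterns, PySem.Str.isIn, List.any_map, Function.comp_def]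

-- ===== VERDICT (by name: the statement is the Claim_ definition above) =====
theorem is_automated_email_spec : Claim_equal_is_automated_email := by
  intro sender _
  exact pvMain_eq sender
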